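-- pv_equiv track=rewrite | github.com/37chengshan/scholar-ai | scripts/evals/v2_4_common.py | unique_source_chunk_ids
-- ===== SOURCE A (Python) =====
-- from typing import Any, Dict, Iterable, List, Optional, Set, Tuple
--
-- def unique_source_chunk_ids(chunks: List[Dict[str, Any]]) -> bool:
--     seen: Set[str] = set()
--     for chunk in chunks:
--         sid = str(chunk.get("source_chunk_id") or "")
--         if not sid:
--             continue
--         if sid in seen:
--             return False
--         seen.add(sid)
--     return True
-- ===== SOURCE B (Python) =====
-- from typing import Any, Dict, List
--
-- def unique_source_chunk_ids(chunks: List[Dict[str, Any]]) -> bool: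
--     ids = [str(c.get("source_chunk_id") or "") for c in chunks]
--     ids = sorted(s for s in ids if s)
--     return all(a != b for a, b in zip(ids, ids[1:]))
-- ===== Notes on version B (the rewrite author's own statement) =====
-- stated objective: alternative
-- what changed: Replaced the hash-set membership loop with early return by the sort-based duplicate check: sort the non-empty ids and verify no two adjacent elements are equal.
import Mathlib
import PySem

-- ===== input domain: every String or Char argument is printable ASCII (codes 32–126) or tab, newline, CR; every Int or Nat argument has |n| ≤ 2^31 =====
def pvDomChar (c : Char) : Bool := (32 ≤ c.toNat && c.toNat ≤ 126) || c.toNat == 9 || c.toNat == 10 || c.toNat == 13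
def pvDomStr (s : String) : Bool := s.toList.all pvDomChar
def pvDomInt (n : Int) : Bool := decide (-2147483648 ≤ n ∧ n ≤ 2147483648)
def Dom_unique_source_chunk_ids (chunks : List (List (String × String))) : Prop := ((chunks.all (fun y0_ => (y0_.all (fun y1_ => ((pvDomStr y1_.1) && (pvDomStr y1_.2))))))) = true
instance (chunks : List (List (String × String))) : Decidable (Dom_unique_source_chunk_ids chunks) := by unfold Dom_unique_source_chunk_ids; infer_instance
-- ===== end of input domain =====

-- B replaces A's incremental hash-set loop by the sort-based duplicate check: sort the
-- non-empty ids and verify no two adjacent elements are equal (objective: alternative; not faster).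

-- shared helper: sid = str(chunk.get("source_chunk_id") or "") — values are strings, so 'or ""' only maps a missing key (or "") to ""
def pvSid (chunk : List (String × String)) : String :=
  match chunk.find? (fun p => p.1 == "source_chunk_id") with
  | some p => p.2
  | none => ""

-- ===== PORT A =====
def uscLoop : List (List (String × String)) → PySem.Set String → Bool
  | [], _ => true
  | chunk :: rest, seen =>
    let sid := pvSid chunk
    if sid = "" then uscLoop rest seen
    else if PySem.Set.contains seen sid then false
    else uscLoop rest (PySem.Set.add seen sid)

def unique_source_chunk_ids (chunks : List (List (String × String))) : Bool :=
  uscLoop chunks PySem.Set.empty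

-- ===== PORT B =====
def unique_source_chunk_ids_alt (chunks : List (List (String × String))) : Bool :=
  let ids0 := chunks.map pvSid
  let ids := PySem.List.sorted (ids0.filter (fun s => !(s = ""))) (fun x => x) false
  (ids.zip (ids.drop 1)).all (fun p => p.1 != p.2)

-- ===== PRECONDITION & SPEC =====
def Spec_unique_source_chunk_ids (chunks : List (List (String × String))) (out : Bool) : Prop := out = unique_source_chunk_ids_alt chunks
instance (chunks : List (List (String × String))) (out : Bool) : Decidable (Spec_unique_source_chunk_ids chunks out) := by unfold Spec_unique_source_chunk_ids; infer_instance

-- ===== CLAIM (what is proved, stated in full; the proofs are below) =====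
def Claim_equal_unique_source_chunk_ids : Prop := ∀ (chunks : List (List (String × String))), Dom_unique_source_chunk_ids chunks → Spec_unique_source_chunk_ids chunks (unique_source_chunk_ids chunks)

-- ===== LEMMAS AND PROOFS =====

-- the non-empty ids, in input order
def pvIds (chunks : List (List (String × String))) : List String :=
  (chunks.map pvSid).filter (fun s => !(s = ""))

-- A's loop returns true iff the remaining non-empty ids are distinct and avoid `seen`
lemma loop_eq_true_iff (l : List (List (String × String))) (seen : List String) :
    uscLoop l seen = true ↔ ((pvIds l).Nodup ∧ ∀ x ∈ pvIds l, x ∉ seen) := by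
  induction l generalizing seen with
  | nil => simp [uscLoop, pvIds]
  | cons c l ih =>
    by_cases hsid : pvSid c = ""
    · have hids : pvIds (c :: l) = pvIds l := by simp [pvIds, hsid]
      simp [uscLoop, hsid, ih, hids]
    · have hids : pvIds (c :: l) = pvSid c :: pvIds l := by simp [pvIds, hsid]
      by_cases hmem : pvSid c ∈ seen
      · have hc : PySem.Set.contains seen (pvSid c) = true := by
          simpa [PySem.Set.contains] using hmem
        simp only [uscLoop, hsid, if_false, hc, if_true]
        constructor
        · intro h; exact absurd h (by simp)
        · rintro ⟨-, hall⟩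
          exact absurd hmem (hall _ (by simp [hids]))
      · have hc : PySem.Set.contains seen (pvSid c) = false := by
          simpa [PySem.Set.contains] using hmem
        simp only [uscLoop, hsid, if_false, hc, Bool.false_eq_true, ih, hids,
          List.nodup_cons, List.mem_cons]
        constructor
        · rintro ⟨hnd, hall⟩
          refine ⟨⟨fun hin => ?_, hnd⟩, ?_⟩
          · have h := hall _ hin
            rw [PySem.Set.mem_add] at h
            exact h (Or.inr rfl)
          · rintro y (rfl | hy)
            · exact hmem
            · intro hys
              have := hall y hy
              rw [PySem.Set.mem_add] at this
              exact this (Or.inl hys)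
        · rintro ⟨⟨hxm, hnd⟩, hall⟩
          refine ⟨hnd, fun y hy => ?_⟩
          rw [PySem.Set.mem_add]
          rintro (hys | rfl)
          · exact hall y (Or.inr hy) hys
          · exact hxm hy

-- on a (≤)-sorted list, "no two adjacent elements are equal" is exactly Nodup
lemma adj_nodup : ∀ (xs : List String), xs.Pairwise (· ≤ ·) →
    (((xs.zip (xs.drop 1)).all (fun p => p.1 != p.2)) = true ↔ xs.Nodup) := by
  intro xs
  induction xs with
  | nil => simp
  | cons x xs ih =>
    cases xs with
    | nil => simp
    | cons y ys =>
      intro hp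
      have hxy : x ≤ y := (List.pairwise_cons.mp hp).1 y (by simp)
      have hy_ys : ∀ z ∈ ys, y ≤ z :=
        fun z hz => (List.pairwise_cons.mp (List.pairwise_cons.mp hp).2).1 z hz
      have hx_all : ∀ z ∈ y :: ys, x ≤ z := (List.pairwise_cons.mp hp).1
      have htail := ih (List.pairwise_cons.mp hp).2
      show ((x != y) && ((y :: ys).zip ((y :: ys).drop 1)).all (fun p => p.1 != p.2)) = true ↔ _
      rw [Bool.and_eq_true, htail, bne_iff_ne]
      simp only [List.nodup_cons]
      constructor
      · rintro ⟨hne, hnd⟩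
        refine ⟨?_, hnd⟩
        intro hmem
        rcases List.mem_cons.mp hmem with rfl | hmem'
        · exact hne rfl
        · have hyx : y ≤ x := hy_ys x hmem'
          exact hne (le_antisymm hxy hyx)
      · rintro ⟨hxm, hnd⟩
        exact ⟨fun h => hxm (h ▸ List.mem_cons_self), hnd⟩

lemma alt_eq_true_iff (chunks : List (List (String × String))) :
    unique_source_chunk_ids_alt chunks = true ↔ (pvIds chunks).Nodup := by
  show ((PySem.List.sorted (pvIds chunks) (fun x => x) false).zip
        ((PySem.List.sorted (pvIds chunks) (fun x => x) false).drop 1)).all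
        (fun p => p.1 != p.2) = true ↔ _
  rw [adj_nodup _ (by simpa using PySem.List.sorted_pairwise (pvIds chunks) (fun x => x))]
  exact (PySem.List.sorted_perm (pvIds chunks) (fun x => x) false).nodup_iff

-- ===== VERDICT (by name: the statement is the Claim_ definition above) =====
theorem unique_source_chunk_ids_spec : Claim_equal_unique_source_chunk_ids := by
  intro chunks _
  show unique_source_chunk_ids chunks = unique_source_chunk_ids_alt chunks
  rw [Bool.eq_iff_iff]
  rw [show unique_source_chunk_ids chunks = uscLoop chunks PySem.Set.empty from rfl]
  rw [loop_eq_true_iff, alt_eq_true_iff]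
  simp [PySem.Set.empty]
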